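-- pv_equiv track=rewrite | github.com/WayneKaiYeh/101 | manufacturelog.py | separate_batches
-- ===== SOURCE A (Python) =====
-- def separate_batches(s):
--     batches = []
--     batch_start = 0 #set to 0 to mark the beginning of each batch.
--
--     for i in range(len(s) - 7): #-7 cuz prefix + 4digits
--         # Check for any alphabet character followed by four digits, and then 'P'/'p' followed by two alphanumeric characters
--         if s[i].isalpha() and s[i+1:i+5].isdigit() and s[i+5].lower() == 'p' and s[i+6:i+8].isalnum():
--              #if the pattern is recognnised
--             if i != batch_start:
--                 #if the current i is different from the batch_start, meaning it is a new batch start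
--                 batches.append(s[batch_start:i]) #we append a new batch inn the list
--             batch_start = i #updates batch_start to the current index i. This marks the beginning of the new batch.
--
--     batches.append(s[batch_start:])  # Add the last batch
--     return batches
-- ===== SOURCE B (Python) =====
-- def separate_batches(s):
--     # Back-to-front: repeatedly find the LAST pattern match before the current
--     # cut, emit that tail segment, and continue on the remaining prefix.
--     n = len(s)
--     out = []
--     hi = n
--     while True:
--         found = 0
--         for p in range(min(hi, n - 7) - 1, 0, -1):
--             if s[p].isalpha() and s[p+1:p+5].isdigit() and s[p+5].lower() == 'p' and s[p+6:p+8].isalnum():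
--                 found = p
--                 break
--         if found == 0:
--             out.append(s[:hi])
--             break
--         out.append(s[found:hi])
--         hi = found
--     out.reverse()
--     return out
-- ===== Notes on version B (the rewrite author's own statement) =====
-- stated objective: alternative
-- what changed: Replaced A's forward single pass with a mutating batch_start cursor by a back-to-front algorithm: repeatedly scan backwards for the LAST pattern match before the current cut, emit that tail segment, shrink the string, and reverse the collected segments at the end.
import Mathlib
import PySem

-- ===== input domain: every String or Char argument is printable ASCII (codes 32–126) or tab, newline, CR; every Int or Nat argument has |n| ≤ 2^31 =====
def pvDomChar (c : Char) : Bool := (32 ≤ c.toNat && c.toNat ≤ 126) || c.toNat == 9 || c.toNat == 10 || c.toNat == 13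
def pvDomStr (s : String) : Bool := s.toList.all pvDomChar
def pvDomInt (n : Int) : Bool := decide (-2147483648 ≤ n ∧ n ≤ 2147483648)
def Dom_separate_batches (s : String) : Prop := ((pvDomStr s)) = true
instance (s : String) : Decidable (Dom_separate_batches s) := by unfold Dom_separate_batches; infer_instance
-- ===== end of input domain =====

-- B replaces A's forward cursor scan by a back-to-front algorithm (find the LAST
-- match before the cut, emit the tail segment, repeat, reverse at the end);
-- objective: alternative, same asymptotic cost.

-- the shared pattern test: s[i].isalpha() and s[i+1:i+5].isdigit() and s[i+5].lower() == 'p' and s[i+6:i+8].isalnum()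
def sbMatch (cs : List Char) (i : Int) : Bool :=
  PySem.Chars.isalpha (PySem.List.pyGetD cs i ' ')
    && PySem.Chars.strIsdigit (PySem.List.slice cs (some (i+1)) (some (i+5)))
    && (PySem.Chars.lowerChar (PySem.List.pyGetD cs (i+5) ' ') == 'p')
    && PySem.Chars.strIsalnum (PySem.List.slice cs (some (i+6)) (some (i+8)))
    -- pyGetD is exact here: i and i+5 are always in range since 0 ≤ i < len - 7

-- ===== PORT A =====
def separate_batches (s : String) : List String :=
  let cs := s.toList
  let st := (PySem.List.pyRange 0 ((cs.length : Int) - 7)).foldl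
    (fun (acc : List String × Int) i =>
      if sbMatch cs i then
        if i ≠ acc.2 then
          (acc.1 ++ [String.ofList (PySem.List.slice cs (some acc.2) (some i))], i)
        else (acc.1, i)
      else acc) ([], 0)
  st.1 ++ [String.ofList (PySem.List.slice cs (some st.2) none)]

-- ===== PORT B =====
-- port of B's inner reverse loop `for p in range(min(hi, n-7)-1, 0, -1): if match(p): found=p; break`
-- (counts down from k to 1; 0 = not found, exactly Source B's sentinel)
def sbRevFind (cs : List Char) : Nat → Nat
  | 0 => 0
  | k+1 => if sbMatch cs ((k+1 : Nat) : Int) then k+1 else sbRevFind cs k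

-- termination bound for sbBuild, cited by its decreasing_by
theorem sbRevFind_le (cs : List Char) : ∀ k, sbRevFind cs k ≤ k := by
  intro k
  induction k with
  | zero => simp [sbRevFind]
  | succ k ih =>
    have h : sbRevFind cs (k+1) =
        if sbMatch cs ((k+1 : Nat) : Int) then k+1 else sbRevFind cs k := rfl
    rw [h]
    split
    · omega
    · omega

-- port of Source B's while-loop: `out` grows by appends, final list is reversed by the caller
def sbBuild (cs : List Char) (out : List String) (hi : Nat) : List String :=
  let found := sbRevFind cs (min hi (cs.length - 7) - 1)
  if found = 0 then
    out ++ [String.ofList (PySem.List.slice cs (some 0) (some (hi : Int)))]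
  else
    sbBuild cs (out ++ [String.ofList (PySem.List.slice cs (some (found : Int)) (some (hi : Int)))]) found
termination_by hi
decreasing_by
  have h1 := sbRevFind_le cs (min hi (cs.length - 7) - 1)
  have h2 : min hi (cs.length - 7) ≤ hi := Nat.min_le_left _ _
  omega

def separate_batches_alt (s : String) : List String :=
  (sbBuild s.toList [] s.toList.length).reverse

-- ===== PRECONDITION & SPEC =====
def Spec_separate_batches (s : String) (out : List String) : Prop := out = separate_batches_alt s
instance (s : String) (out : List String) : Decidable (Spec_separate_batches s out) := by unfold Spec_separate_batches; infer_instance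

-- ===== CLAIM (what is proved, stated in full; the proofs are below) =====
def Claim_equal_separate_batches : Prop := ∀ (s : String), Dom_separate_batches s → Spec_separate_batches s (separate_batches s)

-- ===== LEMMAS AND PROOFS =====

-- slice of a boundary pair (Int version, for the A side)
def sbF (cs : List Char) (ab : Int × Int) : String :=
  String.ofList (PySem.List.slice cs (some ab.1) (some ab.2))

-- slice of a boundary pair (Nat version, for the B side)
def sbFN (cs : List Char) (ab : Nat × Nat) : String :=
  sbF cs ((ab.1 : Int), (ab.2 : Int))

-- the nonzero match positions, ascending
def sbM (cs : List Char) : List Nat :=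
  (List.range (cs.length - 7)).filter (fun p => decide (0 < p) && sbMatch cs (p : Int))

-- A's inner loop body once the match test has been filtered out
def sbG (cs : List Char) (acc : List String × Int) (i : Int) : List String × Int :=
  if i ≠ acc.2 then
    (acc.1 ++ [String.ofList (PySem.List.slice cs (some acc.2) (some i))], i)
  else (acc.1, i)

lemma sbSegLoop (cs : List Char) (ps : List Int) : ∀ (b : Int) (acc : List String),
    (∀ p ∈ ps, b < p) → ps.Pairwise (· < ·) →
    ps.foldl (sbG cs) (acc, b) = (acc ++ ((b :: ps).zip ps).map (sbF cs), ps.getLastD b) := by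
  induction ps with
  | nil => intro b acc _ _; simp
  | cons p ps ih =>
    intro b acc hb hpw
    have hbp : b < p := hb p (by simp)
    have hstep : sbG cs (acc, b) p =
        (acc ++ [String.ofList (PySem.List.slice cs (some b) (some p))], p) := by
      simp [sbG]
      omega
    have hrest : ∀ q ∈ ps, p < q := fun q hq => (List.pairwise_cons.mp hpw).1 q hq
    simp only [List.foldl_cons, hstep,
      ih p (acc ++ [String.ofList (PySem.List.slice cs (some b) (some p))]) hrest
        (List.pairwise_cons.mp hpw).2]
    rw [List.zip_cons_cons, List.map_cons, List.getLastD_cons]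
    simp [sbF]

lemma sbPairwise_pyRange (m : Int) : (PySem.List.pyRange 0 m).Pairwise (· < ·) := by
  rcases le_or_gt 0 m with h | h
  · have : m = ((m.toNat : Nat) : Int) := by omega
    rw [this, PySem.List.pyRange_zero_natCast]
    exact List.pairwise_lt_range.map _ (by intro a b hab; exact_mod_cast hab)
  · have : PySem.List.pyRange 0 m = [] := by
      apply List.eq_nil_iff_forall_not_mem.mpr
      intro x hx
      have := PySem.List.mem_pyRange_one.mp hx
      omega
    simp [this]

lemma sbFoldInit (cs : List Char) (ps : List Int)
    (h0 : ∀ p ∈ ps, 0 ≤ p) (hpw : ps.Pairwise (· < ·)) :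
    ps.foldl (sbG cs) ([], 0) =
      (((0 :: ps.filter (fun p => p ≠ 0)).zip (ps.filter (fun p => p ≠ 0))).map (sbF cs),
        (ps.filter (fun p => p ≠ 0)).getLastD 0) := by
  cases ps with
  | nil => simp
  | cons p rest =>
    have hrest : ∀ q ∈ rest, p < q := fun q hq => (List.pairwise_cons.mp hpw).1 q hq
    have hpwr : rest.Pairwise (· < ·) := (List.pairwise_cons.mp hpw).2
    by_cases hp : p = 0
    · subst hp
      have hfil : rest.filter (fun p => p ≠ 0) = rest := by
        apply List.filter_eq_self.mpr
        intro q hq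
        have := hrest q hq
        simp; omega
      have hstep : sbG cs (([] : List String), 0) 0 = ([], 0) := by simp [sbG]
      have hfil0 : List.filter (fun p => decide (p ≠ 0)) ((0 : Int) :: rest) = rest := by
        rw [List.filter_cons_of_neg (by simp), hfil]
      rw [hfil0, List.foldl_cons, hstep, sbSegLoop cs rest 0 [] hrest hpwr]
      simp
    · have hppos : 0 < p := by have := h0 p (by simp); omega
      have hall : ∀ q ∈ p :: rest, 0 < q := by
        intro q hq
        rcases List.mem_cons.mp hq with rfl | hq
        · exact hppos
        · have := hrest q hq; omega
      have hfil : (p :: rest).filter (fun p => p ≠ 0) = p :: rest := by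
        apply List.filter_eq_self.mpr
        intro q hq
        have := hall q hq
        simp; omega
      rw [hfil]
      exact sbSegLoop cs (p :: rest) 0 [] hall hpw

lemma sbLastSlice (cs : List Char) (a : Int) (ha : 0 ≤ a) :
    PySem.List.slice cs (some a) (some ((cs.length : Nat) : Int)) =
      PySem.List.slice cs (some a) none := by
  rw [PySem.List.slice_toNat cs ha (by positivity), PySem.List.slice_from cs ha]
  apply List.take_of_length_le
  simp

-- zip of boundaries with their successors, last boundary split off
lemma sbZipSnoc {α : Type} (qs : List α) : ∀ (b L : α),
    (b :: qs).zip (qs ++ [L]) = ((b :: qs).zip qs) ++ [(qs.getLastD b, L)] := by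
  induction qs with
  | nil => intro b L; simp
  | cons q qs ih =>
    intro b L
    simp only [List.cons_append, List.zip_cons_cons, ih q L, List.getLastD_cons]

-- ps' (A's Int split positions) is the cast of sbM
lemma sbPos_eq (cs : List Char) :
    (((PySem.List.pyRange 0 ((cs.length : Int) - 7)).filter (fun i => sbMatch cs i)).filter
        (fun p => p ≠ 0)) = (sbM cs).map (fun n : Nat => (n : Int)) := by
  rcases le_or_gt 7 cs.length with h | h
  · have hcast : (cs.length : Int) - 7 = ((cs.length - 7 : Nat) : Int) := by omega
    rw [hcast, PySem.List.pyRange_zero_natCast, List.filter_map, List.filter_map]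
    unfold sbM
    congr 1
    rw [List.filter_filter]
    apply List.filter_congr
    intro p _
    simp only [Function.comp]
    rcases p with _ | n
    · simp
    · have h1 : ((n : Int) + 1) ≠ 0 := by positivity
      simp [h1]
  · have hemp : PySem.List.pyRange 0 ((cs.length : Int) - 7) = [] := by
      apply List.eq_nil_iff_forall_not_mem.mpr
      intro x hx
      have := PySem.List.mem_pyRange_one.mp hx
      omega
    have hemp2 : cs.length - 7 = 0 := by omega
    simp [hemp, sbM, hemp2]

-- sbM is sorted and its members are nonzero and < len - 7
lemma sbM_pairwise (cs : List Char) : (sbM cs).Pairwise (· < ·) :=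
  List.pairwise_lt_range.filter _

lemma sbM_mem (cs : List Char) (p : Nat) (hp : p ∈ sbM cs) : 0 < p ∧ p < cs.length - 7 := by
  unfold sbM at hp
  have h1 := List.mem_range.mp (List.mem_of_mem_filter hp)
  have h2 := List.of_mem_filter hp
  simp at h2
  exact ⟨h2.1, h1⟩

-- the reverse scan finds the last nonzero match position ≤ k
lemma sbRevFind_eq (cs : List Char) : ∀ k, sbRevFind cs k =
    (((List.range (k+1)).filter
        (fun p : Nat => decide (0 < p) && sbMatch cs (p : Int))).getLastD 0) := by
  intro k
  induction k with
  | zero => simp [sbRevFind, List.range_succ]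
  | succ k ih =>
    have hstep : sbRevFind cs (k+1) =
        if sbMatch cs ((k+1 : Nat) : Int) then k+1 else sbRevFind cs k := rfl
    have hcast : ((k+1 : Nat) : Int) = (k : Int) + 1 := by push_cast; ring
    rw [hstep, List.range_succ, List.filter_append]
    by_cases h : sbMatch cs ((k+1 : Nat) : Int)
    · rw [if_pos h]
      have h' : sbMatch cs ((k : Int) + 1) = true := hcast ▸ h
      have hf : List.filter (fun p : Nat => decide (0 < p) && sbMatch cs (p : Int)) [k+1]
          = [k+1] := by simp [h']
      rw [hf, List.getLastD_concat]
    · rw [if_neg h]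
      have h' : sbMatch cs ((k : Int) + 1) ≠ true := by rw [← hcast]; exact h
      have hf : List.filter (fun p : Nat => decide (0 < p) && sbMatch cs (p : Int)) [k+1]
          = [] := by simp [h']
      rw [hf, List.append_nil]
      exact ih

lemma sbRangeFilterLt (c : Nat → Bool) (b : Nat) : ∀ a,
    (List.range a).filter (fun p => c p && decide (p < b)) = (List.range (min a b)).filter c := by
  intro a
  induction a with
  | zero => simp
  | succ a ih =>
    rw [List.range_succ, List.filter_append, ih]
    by_cases h : a < b
    · have hm1 : min a b = a := by omega
      have hm2 : min (a+1) b = a + 1 := by omega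
      rw [hm1, hm2, List.range_succ, List.filter_append]
      by_cases hc : c a <;> simp [hc, h]
    · have hm : min (a+1) b = min a b := by omega
      rw [hm]
      simp [h]

-- what found computes: the last split position < hi (0 if none)
lemma sbFound (cs : List Char) (hi : Nat) :
    sbRevFind cs (min hi (cs.length - 7) - 1) =
      ((sbM cs).filter (fun q => decide (q < hi))).getLastD 0 := by
  rw [sbRevFind_eq]
  unfold sbM
  rw [List.filter_filter]
  have hcomm : ∀ p : Nat, (decide (p < hi) && (decide (0 < p) && sbMatch cs (p : Int))) =
      ((decide (0 < p) && sbMatch cs (p : Int)) && decide (p < hi)) := by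
    intro p; rw [Bool.and_comm]
  rw [List.filter_congr (fun p _ => hcomm p), sbRangeFilterLt]
  have : min hi (cs.length - 7) - 1 + 1 = min (cs.length - 7) hi ∨
      (min (cs.length - 7) hi = 0 ∧ min hi (cs.length - 7) - 1 + 1 = 1) := by omega
  rcases this with h | ⟨h0, h1⟩
  · rw [h]
  · rw [h0, h1]
    simp

-- if found = 0 then there is no split below hi
lemma sbQ_nil (cs : List Char) (hi : Nat)
    (h : ((sbM cs).filter (fun q => decide (q < hi))).getLastD 0 = 0) :
    (sbM cs).filter (fun q => decide (q < hi)) = [] := by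
  by_contra hne
  have hmem : ((sbM cs).filter (fun q => decide (q < hi))).getLastD 0 ∈
      (sbM cs).filter (fun q => decide (q < hi)) := by
    cases hQ : (sbM cs).filter (fun q => decide (q < hi)) with
    | nil => exact absurd hQ hne
    | cons x xs =>
      rw [List.getLastD_cons]
      have := List.getLast_mem (l := x :: xs) (by simp)
      rwa [List.getLast_eq_getLastD] at this
  rw [h] at hmem
  have := (sbM_mem cs 0 (List.mem_of_mem_filter hmem)).1
  omega

-- if found = p ≠ 0 then the splits below hi are the splits below p followed by p
lemma sbQ_split (cs : List Char) (hi p : Nat)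
    (hp : ((sbM cs).filter (fun q => decide (q < hi))).getLastD 0 = p) (hne : p ≠ 0) :
    (sbM cs).filter (fun q => decide (q < hi)) =
      (sbM cs).filter (fun q => decide (q < p)) ++ [p] := by
  cases hQ : (sbM cs).filter (fun q => decide (q < hi)) with
  | nil => rw [hQ] at hp; simp at hp; omega
  | cons x xs =>
    have hp' : (x :: xs).getLastD 0 = p := by rw [← hQ, hp]
    have hlast : (x :: xs).getLast (by simp) = p := by
      rw [List.getLast_eq_getLastD]
      rwa [List.getLastD_cons] at hp'
    have hdecomp : x :: xs = (x :: xs).dropLast ++ [p] := by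
      conv_lhs => rw [← List.dropLast_append_getLast (l := x :: xs) (by simp)]
      rw [hlast]
    have hpwQ : (x :: xs).Pairwise (· < ·) := by
      rw [← hQ]; exact (sbM_pairwise cs).filter _
    have hbound : ∀ q ∈ (x :: xs).dropLast, q < p := by
      intro q hq
      have := hdecomp ▸ hpwQ
      rw [List.pairwise_append] at this
      exact this.2.2 q hq p (by simp)
    have hph : p < hi := by
      have : p ∈ (sbM cs).filter (fun q => decide (q < hi)) := by
        rw [hQ, hdecomp]; simp
      have := List.of_mem_filter this
      simpa using this
    have hfil : (sbM cs).filter (fun q => decide (q < p)) =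
        ((sbM cs).filter (fun q => decide (q < hi))).filter (fun q => decide (q < p)) := by
      rw [List.filter_filter]
      apply List.filter_congr
      intro q _
      by_cases h1 : q < p
      · have : q < hi := by omega
        simp [h1, this]
      · simp [h1]
    rw [hfil, hQ, hdecomp, List.filter_append, List.filter_eq_self.mpr
      (by intro q hq; simpa using hbound q hq)]
    simp

lemma sbZipSnoc2 : ∀ (qs : List Nat) (b p L : Nat),
    (b :: (qs ++ [p])).zip ((qs ++ [p]) ++ [L]) = ((b :: qs).zip (qs ++ [p])) ++ [(p, L)] := by
  intro qs
  induction qs with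
  | nil => intro b p L; simp
  | cons q qs ih =>
    intro b p L
    simp only [List.cons_append, List.zip_cons_cons]
    rw [ih q p L]

-- main B-side invariant: sbBuild produces the reversed segment list
lemma sbBuild_eq (cs : List Char) : ∀ hi, ∀ out : List String,
    sbBuild cs out hi = out ++
      (((0 :: (sbM cs).filter (fun q => decide (q < hi))).zip
          ((sbM cs).filter (fun q => decide (q < hi)) ++ [hi])).map (sbFN cs)).reverse := by
  intro hi
  induction hi using Nat.strong_induction_on with
  | _ hi ih =>
    intro out
    rw [sbBuild, sbFound]
    by_cases h : ((sbM cs).filter (fun q => decide (q < hi))).getLastD 0 = 0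
    · rw [if_pos h, sbQ_nil cs hi h]
      simp [sbFN, sbF]
    · rw [if_neg h]
      set p := ((sbM cs).filter (fun q => decide (q < hi))).getLastD 0 with hpdef
      have hsplit := sbQ_split cs hi p rfl h
      have hplt : p < hi := by
        have : p ∈ (sbM cs).filter (fun q => decide (q < hi)) := by
          rw [hsplit]; simp
        simpa using List.of_mem_filter this
      rw [ih p hplt, hsplit]
      rw [sbZipSnoc2 ((sbM cs).filter (fun q => decide (q < p))) 0 p hi,
        List.map_append, List.reverse_append]
      simp [sbFN, sbF]

-- getLastD through map
lemma sbGetLastD_mapD (l : List Nat) : ∀ d : Nat,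
    ((l.map (fun n : Nat => (n : Int))).getLastD (d : Int)) = ((l.getLastD d : Nat) : Int) := by
  induction l with
  | nil => intro d; simp
  | cons x xs ih =>
    intro d
    rw [List.map_cons, List.getLastD_cons, List.getLastD_cons]
    exact ih x

lemma sbGetLastD_map (l : List Nat) :
    ((l.map (fun n : Nat => (n : Int))).getLastD 0) = ((l.getLastD 0 : Nat) : Int) := by
  have := sbGetLastD_mapD l 0
  simpa using this

-- ===== VERDICT (by name: the statement is the Claim_ definition above) =====
theorem separate_batches_spec : Claim_equal_separate_batches := by
  intro s _
  unfold Spec_separate_batches separate_batches separate_batches_alt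
  simp only []
  set cs := s.toList with hcs
  set m : Int := (cs.length : Int) - 7 with hm
  set positions := (PySem.List.pyRange 0 m).filter (fun i => sbMatch cs i) with hpos
  have hmem : ∀ p ∈ positions, 0 ≤ p ∧ p < m := by
    intro p hp
    have := PySem.List.mem_pyRange_one.mp (List.mem_of_mem_filter hp)
    omega
  have hpw : positions.Pairwise (· < ·) := (sbPairwise_pyRange m).filter _
  have hA : (PySem.List.pyRange 0 m).foldl
      (fun (acc : List String × Int) i =>
        if sbMatch cs i then
          if i ≠ acc.2 then
            (acc.1 ++ [String.ofList (PySem.List.slice cs (some acc.2) (some i))], i)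
          else (acc.1, i)
        else acc) ([], 0) = positions.foldl (sbG cs) ([], 0) := by
    rw [hpos, List.foldl_filter]
    rfl
  rw [hA, sbFoldInit cs positions (fun p hp => (hmem p hp).1) hpw]
  dsimp only
  -- A's split positions are the casts of sbM
  have hps : positions.filter (fun p => p ≠ 0) = (sbM cs).map (fun n : Nat => (n : Int)) := by
    rw [hpos, hm]; exact sbPos_eq cs
  rw [hps]
  -- B's fold: all of sbM lies below cs.length
  have hQall : (sbM cs).filter (fun q => decide (q < cs.length)) = sbM cs := by
    apply List.filter_eq_self.mpr
    intro q hq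
    have := sbM_mem cs q hq
    simp; omega
  rw [sbBuild_eq cs cs.length [], hQall, List.nil_append, List.reverse_reverse]
  -- split the last boundary off the B-side zip
  rw [sbZipSnoc (sbM cs) 0 cs.length, List.map_append]
  -- and turn the Nat zip-map into the Int zip-map
  have hcast0 : ((0 : Nat) :: sbM cs).map (fun n : Nat => (n : Int)) =
      (0 : Int) :: (sbM cs).map (fun n : Nat => (n : Int)) := by simp
  have hzipmap : (((0 : Int) :: (sbM cs).map (fun n : Nat => (n : Int))).zip
        ((sbM cs).map (fun n : Nat => (n : Int)))) =
      (((0 : Nat) :: sbM cs).zip (sbM cs)).map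
        (Prod.map (fun n : Nat => (n : Int)) (fun n : Nat => (n : Int))) := by
    rw [← hcast0, List.zip_map]
  rw [hzipmap, List.map_map]
  have hfun : (sbF cs ∘ Prod.map (fun n : Nat => (n : Int)) (fun n : Nat => (n : Int))) =
      sbFN cs := by
    funext ab
    cases ab
    rfl
  rw [hfun]
  congr 1
  -- the last segment: slice to the end equals slice to len
  rw [sbGetLastD_map]
  have h0 : (0 : Int) ≤ ((sbM cs).getLastD 0 : Nat) := by positivity
  simp only [List.map_cons, List.map_nil, sbFN, sbF]
  rw [sbLastSlice cs _ h0]
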